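-- pv_equiv track=rewrite | github.com/hyeokjulee/programmers | python/110 옮기기.py | solution
-- ===== SOURCE A (Python) =====
-- def solution(s):
--     answer = []
--
--     for x in s:
--         y = []
--         cnt = 0
--
--         for ch in x:
--             y.append(ch)
--             if len(y) >= 3 and y[-3] == '1' and y[-2] == '1' and y[-1] == '0':
--                 del y[-3:]
--                 cnt += 1
--
--         idx = 0
--         for i in range(len(y) - 1, -1, -1):
--             if y[i] == '0':
--                 idx = i + 1
--                 break
--
--         z = y[:idx] + ['1','1','0'] * cnt + y[idx:]
--         answer.append(''.join(z))
--
--     return answer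
-- ===== SOURCE B (Python) =====
-- def solution(s):
--     answer = []
--     for x in s:
--         collapsed = x
--         while '110' in collapsed:
--             collapsed = collapsed.replace('110', '')
--         cnt = (len(x) - len(collapsed)) // 3
--         idx = collapsed.rfind('0') + 1
--         answer.append(collapsed[:idx] + '110' * cnt + collapsed[idx:])
--     return answer
-- ===== Notes on version B (the rewrite author's own statement) =====
-- stated objective: simpler
-- what changed: Replaces the char-by-char stack simulation and the manual backward break-loop by a while-replace('110','') normal-form loop, recovering the removal count from the length difference (each removal deletes 3 chars) and the insertion point from rfind('0')+1.
import Mathlib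
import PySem

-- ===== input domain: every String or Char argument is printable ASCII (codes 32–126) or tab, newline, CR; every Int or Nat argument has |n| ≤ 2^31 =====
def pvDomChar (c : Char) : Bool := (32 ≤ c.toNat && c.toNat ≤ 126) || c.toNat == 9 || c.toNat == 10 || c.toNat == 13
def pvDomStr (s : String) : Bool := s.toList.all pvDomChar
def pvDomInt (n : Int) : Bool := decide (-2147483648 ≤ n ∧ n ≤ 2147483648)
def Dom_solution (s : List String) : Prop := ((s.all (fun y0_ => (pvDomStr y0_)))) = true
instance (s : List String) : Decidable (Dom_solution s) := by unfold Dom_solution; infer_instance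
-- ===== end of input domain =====

-- B replaces A's char-by-char stack simulation by a while-replace('110','') normal-form loop,
-- recovering the count from the length difference and the insertion point from rfind('0')+1.

-- ===== PORT A =====
-- the test 'len(y) >= 3 and y[-3] == '1' and y[-2] == '1' and y[-1] == '0''
def condA (y : List Char) : Bool :=
  decide (3 ≤ y.length) && (PySem.List.pyGet? y (-3) == some '1') &&
    (PySem.List.pyGet? y (-2) == some '1') && (PySem.List.pyGet? y (-1) == some '0')

-- body of A's inner character loop: y.append(ch); conditionally 'del y[-3:]' (= keep y[:-3]) and cnt += 1
def stepA (st : List Char × Int) (ch : Char) : List Char × Int :=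
  if condA (st.1 ++ [ch]) then (PySem.List.slice (st.1 ++ [ch]) none (some (-3)), st.2 + 1)
  else (st.1 ++ [ch], st.2)

-- 'for i in range(len(y)-1,-1,-1): if y[i] == '0': idx = i+1; break' with idx = 0 initially
def idxLoopA (y : List Char) : List Int → Int
  | [] => 0
  | i :: rest => if PySem.List.pyGet? y i = some '0' then i + 1 else idxLoopA y rest

def solution (s : List String) : List String :=
  s.foldl (fun answer x =>
    let yc := x.toList.foldl stepA ([], 0)
    let idx := idxLoopA yc.1 (PySem.List.pyRange ((yc.1.length : Int) - 1) (-1) (-1))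
    -- ['1','1','0'] * cnt : exact, Python's list*n is [] for n ≤ 0 just as toNat clamps
    let z := PySem.List.slice yc.1 none (some idx)
          ++ (List.replicate yc.2.toNat ['1','1','0']).flatten
          ++ PySem.List.slice yc.1 (some idx) none
    answer ++ [String.ofList z]) []

-- ===== PORT B =====
-- leftmost-scan single pass of str.replace('110',''), used only to prove collapseB terminates
def repl : List Char → List Char
  | [] => []
  | c :: t => if ['1','1','0'].isPrefixOf (c :: t) then repl (t.drop 2) else c :: repl t
termination_by l => l.length
decreasing_by
  · simp only [List.length_drop, List.length_cons]; omega
  · simp only [List.length_cons]; omega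

theorem replace_go_eq_repl (fuel : Nat) (l acc : List Char) (h : l.length ≤ fuel) :
    PySem.Chars.replace.go ['1','1','0'] [] fuel l acc = acc.reverse ++ repl l := by
  induction fuel generalizing l acc with
  | zero =>
      have hl : l = [] := by cases l <;> simp_all
      subst hl; simp [PySem.Chars.replace.go, repl]
  | succ n ih =>
      cases l with
      | nil => simp [PySem.Chars.replace.go, repl]
      | cons c t =>
          rw [PySem.Chars.replace.go.eq_def]
          by_cases hp : ['1','1','0'].isPrefixOf (c :: t) = true
          · simp only [hp, if_true, List.reverse_nil, List.nil_append]
            rw [ih _ _ (by simp only [List.length_drop, List.length_cons] at *; omega)]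
            rw [repl]
            simp [hp]
          · simp only [hp, if_false, Bool.false_eq_true]
            rw [ih _ _ (by simp at h ⊢; omega)]
            rw [repl]
            simp [hp]

theorem replace_eq_repl (l : List Char) :
    PySem.Chars.replace l ['1','1','0'] [] = repl l := by
  rw [PySem.Chars.replace]
  simp [replace_go_eq_repl l.length l [] le_rfl]

theorem repl_length_le (l : List Char) : (repl l).length ≤ l.length := by
  induction l using repl.induct with
  | case1 => simp [repl]
  | case2 c t hp ih => rw [repl, if_pos hp]; simp only [List.length_drop, List.length_cons] at *; omega
  | case3 c t hp ih => rw [repl, if_neg hp]; simp only [List.length_cons]; omega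

theorem repl_length_lt (l : List Char) (h : ['1','1','0'] <:+: l) :
    (repl l).length < l.length := by
  induction l using repl.induct with
  | case1 => simp at h
  | case2 c t hp ih =>
      rw [repl, if_pos hp]
      have := repl_length_le (t.drop 2)
      simp only [List.length_drop, List.length_cons] at *
      have h3 : 2 ≤ t.length := by
        have := List.IsPrefix.length_le ((List.isPrefixOf_iff_prefix).mp hp)
        simp at this; omega
      omega
  | case3 c t hp ih =>
      rw [repl, if_neg hp]
      have ht : ['1','1','0'] <:+: t := by
        rcases (List.infix_cons_iff.mp h) with h1 | h2
        · exact absurd ((List.isPrefixOf_iff_prefix).mpr h1) hp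
        · exact h2
      simp only [List.length_cons]; exact Nat.succ_lt_succ (ih ht)

theorem replace_length_lt (l : List Char) (h : PySem.Chars.isIn ['1','1','0'] l = true) :
    (PySem.Chars.replace l ['1','1','0'] []).length < l.length := by
  rw [replace_eq_repl]; exact repl_length_lt l ((PySem.Chars.isIn_iff_infix _ _).mp h)

-- "while '110' in collapsed: collapsed = collapsed.replace('110','')" on code points
def collapseB (cs : List Char) : List Char :=
  if h : PySem.Chars.isIn ['1','1','0'] cs = true
  then collapseB (PySem.Chars.replace cs ['1','1','0'] [])
  else cs
termination_by cs.length
decreasing_by exact replace_length_lt cs h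

def solution_alt (s : List String) : List String :=
  s.foldl (fun answer x =>
    let collapsed := collapseB x.toList
    let cnt := PySem.Int.floordiv ((x.toList.length : Int) - (collapsed.length : Int)) 3
    let idx := PySem.Chars.rfind collapsed ['0'] + 1
    -- '110' * cnt : exact, Python's str*n is '' for n ≤ 0 just as toNat clamps
    answer ++ [String.ofList (PySem.Chars.slice collapsed none (some idx)
          ++ (List.replicate cnt.toNat ['1','1','0']).flatten
          ++ PySem.Chars.slice collapsed (some idx) none)]) []

-- ===== PRECONDITION & SPEC =====
def Spec_solution (s : List String) (out : List String) : Prop := out = solution_alt s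
instance (s : List String) (out : List String) : Decidable (Spec_solution s out) := by unfold Spec_solution; infer_instance

-- ===== CLAIM (what is proved, stated in full; the proofs are below) =====
def Claim_equal_solution : Prop := ∀ (s : List String), Dom_solution s → Spec_solution s (solution s)

-- ===== LEMMAS AND PROOFS =====

theorem pyGet?_neg' {α : Type} (l : List α) (i : Int) (h1 : i < 0) (h2 : -i ≤ (l.length : Int)) :
    PySem.List.pyGet? l i = l[l.length - (-i).toNat]? := by
  simp only [PySem.List.pyGet?, PySem.List.pyIdx?]
  rw [if_neg (by omega), if_pos (by omega)]
  simp

theorem not_condA_last_one (u : List Char) : ¬ condA (u ++ ['1']) = true := by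
  intro hc
  simp only [condA, Bool.and_eq_true, decide_eq_true_eq, beq_iff_eq] at hc
  obtain ⟨⟨⟨h1, h2⟩, h3⟩, h4⟩ := hc
  rw [pyGet?_neg' _ (-1) (by omega) (by push_cast; omega)] at h4
  simp at h4

theorem condA_cat110 (u : List Char) : condA (u ++ ['1', '1', '0']) = true := by
  simp only [condA, Bool.and_eq_true, decide_eq_true_eq, beq_iff_eq]
  refine ⟨⟨⟨by simp, ?_⟩, ?_⟩, ?_⟩ <;>
  · rw [pyGet?_neg' _ _ (by omega) (by simp; try omega)]
    simp

theorem slice110 (u : List Char) :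
    PySem.List.slice (u ++ ['1', '1', '0']) none (some (-3)) = u := by
  rw [PySem.List.slice_to_neg_ofNat _ 3 (by omega)]
  simp

theorem condA_suffix (y : List Char) (h : condA y = true) : ['1','1','0'] <:+ y := by
  simp only [condA, Bool.and_eq_true, decide_eq_true_eq, beq_iff_eq] at h
  obtain ⟨⟨⟨h1, h2⟩, h3⟩, h4⟩ := h
  rw [pyGet?_neg' _ (-3) (by omega) (by simp; omega)] at h2
  rw [pyGet?_neg' _ (-2) (by omega) (by push_cast; omega)] at h3
  rw [pyGet?_neg' _ (-1) (by omega) (by push_cast; omega)] at h4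
  have hd : y.drop (y.length - 3) = ['1','1','0'] := by
    apply List.ext_getElem?
    intro i
    rcases i with _ | _ | _ | i
    · simpa [List.getElem?_drop] using h2
    · rw [List.getElem?_drop]
      rw [show y.length - 3 + 1 = y.length - 2 by omega]
      simpa using h3
    · rw [List.getElem?_drop]
      rw [show y.length - 3 + 2 = y.length - 1 by omega]
      simpa using h4
    · rw [List.getElem?_drop]
      rw [List.getElem?_eq_none (by omega), List.getElem?_eq_none (by simp)]
  rw [← hd]; exact List.drop_suffix _ _

theorem absorb (y : List Char) (c : Int) :
    List.foldl stepA (y, c) ['1', '1', '0'] = (y, c + 1) := by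
  simp only [List.foldl]
  rw [show stepA (y, c) '1' = (y ++ ['1'], c) from by rw [stepA, if_neg (not_condA_last_one y)]]
  rw [show stepA (y ++ ['1'], c) '1' = (y ++ ['1','1'], c) from by
    rw [stepA, if_neg (by simpa using not_condA_last_one (y ++ ['1']))]
    simp]
  rw [stepA]
  rw [if_pos (by simpa using condA_cat110 y)]
  simp only
  congr 1
  simpa using slice110 y

theorem fold_shift (l : List Char) (y : List Char) (c : Int) :
    List.foldl stepA (y, c) l
      = ((List.foldl stepA (y, 0) l).1, c + (List.foldl stepA (y, 0) l).2) := by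
  induction l generalizing y c with
  | nil => simp
  | cons ch t ih =>
      simp only [List.foldl_cons, stepA]
      by_cases hc : condA (y ++ [ch]) = true
      · rw [if_pos hc, if_pos hc, ih _ (c + 1), ih _ (0 + 1)]
        simp [add_assoc]
      · rw [if_neg hc, if_neg hc, ih _ c, ih _ 0]

theorem fold_repl (l : List Char) (y : List Char) (c : Int) :
    (List.foldl stepA (y, c) (repl l)).1 = (List.foldl stepA (y, c) l).1 := by
  induction l using repl.induct generalizing y c with
  | case1 => simp [repl]
  | case2 c0 t hp ih =>
      obtain ⟨r, hr⟩ := List.isPrefixOf_iff_prefix.mp hp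
      have hc0 : c0 = '1' := by
        have := congrArg (fun l => l[0]?) hr; simpa using this.symm
      have ht : t = '1' :: '0' :: r := by
        have := congrArg List.tail hr; simpa using this.symm
      have hdrop : t.drop 2 = r := by rw [ht]; rfl
      rw [repl, if_pos hp, hdrop]
      subst hc0 ht
      have hsplit : ('1' :: '1' :: '0' :: r) = ['1','1','0'] ++ r := rfl
      have ih' : (List.foldl stepA (y, c) (repl r)).1
          = (List.foldl stepA (y, c) r).1 := by simpa using ih y c
      rw [hsplit, List.foldl_append, absorb, ih', fold_shift r y c,
        fold_shift r y (c + 1)]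
  | case3 c0 t hp ih =>
      rw [repl, if_neg hp]
      simp only [List.foldl_cons]
      have := ih (stepA (y, c) c0).1 (stepA (y, c) c0).2
      simpa using this

theorem fold_nofix (l : List Char) (y : List Char) (c : Int)
    (h : ¬ ['1','1','0'] <:+: (y ++ l)) :
    List.foldl stepA (y, c) l = (y ++ l, c) := by
  induction l generalizing y with
  | nil => simp
  | cons ch t ih =>
      have hc : ¬ condA (y ++ [ch]) = true := by
        intro hcc
        exact h (((condA_suffix _ hcc).isInfix).trans
          (List.IsPrefix.isInfix ⟨t, by simp⟩))
      simp only [List.foldl_cons, stepA, if_neg hc]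
      rw [ih (y ++ [ch]) (by simpa using h)]
      simp

theorem collapseB_eq (l : List Char) :
    collapseB l = (List.foldl stepA ([], 0) l).1 := by
  induction l using collapseB.induct with
  | case1 cs hin ih =>
      rw [collapseB, dif_pos hin, ih, replace_eq_repl]
      exact fold_repl cs [] 0
  | case2 cs hin =>
      rw [collapseB, dif_neg hin]
      have hni : ¬ ['1','1','0'] <:+: cs :=
        (PySem.Chars.isIn_eq_false_iff _ _).mp (by simpa using hin)
      rw [fold_nofix cs [] 0 (by simpa using hni)]
      simp

theorem fold_count (l : List Char) (y : List Char) (c : Int) :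
    ((List.foldl stepA (y, c) l).1.length : Int) + 3 * (List.foldl stepA (y, c) l).2
      = (y.length : Int) + 3 * c + l.length := by
  induction l generalizing y c with
  | nil => simp
  | cons ch t ih =>
      simp only [List.foldl_cons, stepA]
      by_cases hc : condA (y ++ [ch]) = true
      · rw [if_pos hc]
        have hI := ih (PySem.List.slice (y ++ [ch]) none (some (-3))) (c + 1)
        have h3 : 3 ≤ y.length + 1 := by
          simp only [condA, Bool.and_eq_true, decide_eq_true_eq] at hc
          simpa using hc.1.1.1
        have hl : (PySem.List.slice (y ++ [ch]) none (some (-3))).length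
            = y.length + 1 - 3 := by
          rw [PySem.List.slice_to_neg_ofNat _ 3 (by omega)]; simp; omega
        rw [hl] at hI
        simp only [List.length_cons]
        omega
      · rw [if_neg hc]
        have hI := ih (y ++ [ch]) c
        simp only [List.length_append, List.length_cons, List.length_nil] at hI
        simp only [List.length_cons]
        omega

theorem hit_iff (y : List Char) (i : Nat) (h : i < y.length) :
    PySem.List.pyGet? y (i : Int) = some '0' ↔ ['0'].isPrefixOf (y.drop i) = true := by
  have hg : PySem.List.pyGet? y (i : Int) = y[i]? := by
    simp only [PySem.List.pyGet?, PySem.List.pyIdx?]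
    rw [if_pos (by omega), if_pos (by omega)]
    simp
  cases hd : y.drop i with
  | nil => exact absurd (congrArg List.length hd) (by simp; omega)
  | cons a t =>
      have ha : y[i]? = some a := by
        have h0 : (y.drop i)[0]? = y[i + 0]? := by rw [List.getElem?_drop]
        rw [hd] at h0; simpa using h0.symm
      rw [hg, ha, List.isPrefixOf_iff_prefix, List.cons_prefix_cons]
      simp [eq_comm]

theorem idx_desc (y : List Char) (j : Nat) (h : j < y.length) :
    idxLoopA y ((List.range (j + 1)).map (fun k : Nat => (j : Int) - (k : Int)))
      = PySem.Chars.rfind.go y ['0'] j + 1 := by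
  induction j with
  | zero =>
      have hl : (List.range (0 + 1)).map (fun k : Nat => ((0 : Nat) : Int) - (k : Int))
          = [(0 : Int)] := by simp
      rw [hl]
      simp only [idxLoopA]
      rw [PySem.Chars.rfind.go]
      by_cases hp : ['0'].isPrefixOf y = true
      · rw [if_pos (by simpa using (hit_iff y 0 h).mpr (by simpa using hp)), if_pos hp]
      · rw [if_neg (fun hcc => hp (by simpa using (hit_iff y 0 h).mp (by simpa using hcc))),
          if_neg hp]
        norm_num
  | succ j ih =>
      have hlist : (List.range (j + 1 + 1)).map (fun k : Nat => ((j + 1 : Nat) : Int) - (k : Int))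
          = ((j + 1 : Nat) : Int) :: (List.range (j + 1)).map (fun k : Nat => (j : Int) - (k : Int)) := by
        rw [List.range_succ_eq_map]
        simp only [List.map_cons, List.map_map, Nat.cast_zero, sub_zero, List.cons.injEq]
        refine ⟨trivial, List.map_congr_left fun k _ => ?_⟩
        simp only [Function.comp_apply]
        push_cast
        omega
      rw [hlist]
      simp only [idxLoopA]
      rw [PySem.Chars.rfind.go]
      by_cases hp : ['0'].isPrefixOf (y.drop (j + 1)) = true
      · rw [if_pos (by simpa using (hit_iff y (j + 1) h).mpr hp), if_pos hp]
      · rw [if_neg (fun hcc => hp ((hit_iff y (j + 1) h).mp (by simpa using hcc))),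
          if_neg hp, ih (by omega)]

theorem idx_eq (y : List Char) :
    idxLoopA y (PySem.List.pyRange ((y.length : Int) - 1) (-1) (-1))
      = PySem.Chars.rfind y ['0'] + 1 := by
  rw [PySem.Chars.rfind, PySem.List.pyRange_neg_one]
  by_cases h0 : y.length = 0
  · have hy : y = [] := List.length_eq_zero_iff.mp h0
    subst hy
    norm_num [idxLoopA, PySem.Chars.rfind.go, List.isPrefixOf]
  · have h1 : (((y.length : Int) - 1) - (-1)).toNat = (y.length - 1) + 1 := by omega
    have h2 : (fun k : Nat => ((y.length : Int) - 1) - (k : Int))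
        = (fun k : Nat => ((y.length - 1 : Nat) : Int) - (k : Int)) := by
      funext k
      have : ((y.length - 1 : Nat) : Int) = (y.length : Int) - 1 := by omega
      rw [this]
    rw [h1, h2]
    have hgo : PySem.Chars.rfind.go y ['0'] y.length
        = PySem.Chars.rfind.go y ['0'] (y.length - 1) := by
      rw [show y.length = (y.length - 1) + 1 by omega, PySem.Chars.rfind.go]
      rw [if_neg (by rw [show y.length - 1 + 1 = y.length by omega, List.drop_length]; decide)]
      rw [show y.length - 1 + 1 - 1 = y.length - 1 by omega]
    rw [hgo]
    exact idx_desc y (y.length - 1) (by omega)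

theorem floordiv_eq_cnt (x : String) :
    PySem.Int.floordiv ((x.toList.length : Int)
        - ((x.toList.foldl stepA ([], 0)).1.length : Int)) 3
      = (x.toList.foldl stepA ([], 0)).2 := by
  have hc := fold_count x.toList [] 0
  simp only [List.length_nil, Nat.cast_zero, mul_zero, add_zero, zero_add] at hc
  have h3 : (x.toList.length : Int) - ((x.toList.foldl stepA ([], 0)).1.length : Int)
      = 3 * (x.toList.foldl stepA ([], 0)).2 := by omega
  rw [h3, PySem.Int.floordiv]
  exact Int.mul_fdiv_cancel_left _ (by norm_num)

theorem elem_eq (x : String) :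
    (let yc := x.toList.foldl stepA ([], 0)
     let idx := idxLoopA yc.1 (PySem.List.pyRange ((yc.1.length : Int) - 1) (-1) (-1))
     String.ofList (PySem.List.slice yc.1 none (some idx)
          ++ (List.replicate yc.2.toNat ['1','1','0']).flatten
          ++ PySem.List.slice yc.1 (some idx) none))
    = (let collapsed := collapseB x.toList
       let cnt := PySem.Int.floordiv ((x.toList.length : Int) - (collapsed.length : Int)) 3
       let idx := PySem.Chars.rfind collapsed ['0'] + 1
       String.ofList (PySem.Chars.slice collapsed none (some idx)
          ++ (List.replicate cnt.toNat ['1','1','0']).flatten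
          ++ PySem.Chars.slice collapsed (some idx) none)) := by
  simp only [collapseB_eq x.toList, floordiv_eq_cnt x,
    ← idx_eq (x.toList.foldl stepA ([], 0)).1, PySem.Chars.slice_eq_listSlice]

-- ===== VERDICT (by name: the statement is the Claim_ definition above) =====
theorem solution_spec : Claim_equal_solution := by
  intro s _
  unfold Spec_solution solution solution_alt
  rw [PySem.List.foldl_append_singleton_eq_map, PySem.List.foldl_append_singleton_eq_map]
  simp only [List.nil_append]
  exact List.map_congr_left (fun x _ => elem_eq x)
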